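-- pv_equiv track=rewrite | github.com/CiscoDevNet/FTDAnsible | httpapi_plugins/helper.py | equal_objects
-- ===== SOURCE A (Python) =====
-- IGNORED_FIELDS = ['id', 'version', 'isSystemDefined', 'links']
--
-- def equal_objects(dict1, dict2):
--     if type(dict1) is not dict or type(dict2) is not dict:
--         raise ValueError("Arguments must be dictionaries")
--
--     dict1 = dict((k, dict1[k]) for k in dict1.keys() if k not in IGNORED_FIELDS and dict1[k])
--     dict2 = dict((k, dict2[k]) for k in dict2.keys() if k not in IGNORED_FIELDS and dict2[k])
--
--     if len(dict1) != len(dict2):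
--         return False
--
--     for key, value1 in dict1.items():
--         if key not in dict2:
--             return False
--
--         value2 = dict2[key]
--
--         if type(value1) != type(value2):
--             return False
--
--         equal_values = value1 == value2 if type(value1) != dict else equal_objects(value1, value2)
--         if not equal_values:
--             return False
--
--     return True
-- ===== SOURCE B (Python) =====
-- IGNORED_FIELDS = ['id', 'version', 'isSystemDefined', 'links']
--
--
-- def equal_objects(dict1, dict2):
--     if type(dict1) is not dict or type(dict2) is not dict:
--         raise ValueError("Arguments must be dictionaries")
--
--     def significant(d):
--         # keep meaningful fields only, then canonicalise order by key
--         return sorted(((k, v) for k, v in d.items()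
--                        if k not in IGNORED_FIELDS and v),
--                       key=lambda kv: kv[0])
--
--     return significant(dict1) == significant(dict2)
-- ===== Notes on version B (the rewrite author's own statement) =====
-- stated objective: simpler
-- what changed: Instead of rebuilding two filtered dicts and walking one while looking keys up in the other, B filters each dict's items once, sorts both lists by key and compares them with a single list equality; string values make the per-value type check and the nested-dict recursion unreachable, so the comparison collapses to one line.
import Mathlib
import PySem

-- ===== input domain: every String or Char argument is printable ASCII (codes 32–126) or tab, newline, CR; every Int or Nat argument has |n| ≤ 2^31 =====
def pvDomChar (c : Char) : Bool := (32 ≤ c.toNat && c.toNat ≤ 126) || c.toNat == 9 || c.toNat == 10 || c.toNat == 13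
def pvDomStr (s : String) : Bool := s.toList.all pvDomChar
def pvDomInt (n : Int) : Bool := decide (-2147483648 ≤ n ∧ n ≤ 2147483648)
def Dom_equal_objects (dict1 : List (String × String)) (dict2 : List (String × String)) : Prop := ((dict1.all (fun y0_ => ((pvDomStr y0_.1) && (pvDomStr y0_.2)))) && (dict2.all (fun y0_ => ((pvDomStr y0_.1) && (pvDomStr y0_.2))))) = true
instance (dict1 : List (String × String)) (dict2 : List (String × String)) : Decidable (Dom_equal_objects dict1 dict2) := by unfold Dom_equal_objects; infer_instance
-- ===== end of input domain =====

-- B replaces A's rebuilt-dict + per-key lookup walk by filter-then-sort-by-key and one list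
-- comparison (objective: simpler); over string-valued dicts the two agree on every input.

-- ===== PORT A =====
def pvIgnoredFields : List String := ["id", "version", "isSystemDefined", "links"]

-- dict((k, d[k]) for k in d.keys() if k not in IGNORED_FIELDS and d[k]); values are strings,
-- so 'and d[k]' is 'd[k] != ""'
def pvCompA (d : PySem.Dict String String) : PySem.Dict String String :=
  PySem.Dict.ofList (d.items.filter (fun kv => !(pvIgnoredFields.contains kv.1) && kv.2 != ""))

-- the 'for key, value1 in dict1.items():' loop with its early returns; values are strings, so
-- type(value1) == type(value2) always holds and the nested-dict recursion branch is unreachable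
def pvLoopA (d2 : PySem.Dict String String) : List (String × String) → Bool
  | [] => true
  | (key, value1) :: rest =>
    if d2.contains key = false then false
    else
      let value2 := d2.getD key ""
      if value1 == value2 then pvLoopA d2 rest else false

-- both arguments are dicts under the type convention, so the ValueError branch never fires
def equal_objects (dict1 : List (String × String)) (dict2 : List (String × String)) : Bool :=
  let d1 := pvCompA (PySem.Dict.ofList dict1)
  let d2 := pvCompA (PySem.Dict.ofList dict2)
  if d1.size ≠ d2.size then false
  else pvLoopA d2 d1.items

-- ===== PORT B =====
-- sorted(((k, v) for k, v in d.items() if k not in IGNORED_FIELDS and v), key=lambda kv: kv[0])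
def pvSignificant (d : PySem.Dict String String) : List (String × String) :=
  PySem.List.sorted (d.items.filter (fun kv => !(pvIgnoredFields.contains kv.1) && kv.2 != ""))
    (fun kv => kv.1)

def equal_objects_alt (dict1 : List (String × String)) (dict2 : List (String × String)) : Bool :=
  pvSignificant (PySem.Dict.ofList dict1) == pvSignificant (PySem.Dict.ofList dict2)

-- ===== PRECONDITION & SPEC =====
def Spec_equal_objects (dict1 : List (String × String)) (dict2 : List (String × String)) (out : Bool) : Prop := out = equal_objects_alt dict1 dict2
instance (dict1 : List (String × String)) (dict2 : List (String × String)) (out : Bool) : Decidable (Spec_equal_objects dict1 dict2 out) := by unfold Spec_equal_objects; infer_instance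

-- ===== CLAIM (what is proved, stated in full; the proofs are below) =====
def Claim_equal_equal_objects : Prop := ∀ (dict1 : List (String × String)) (dict2 : List (String × String)), Dom_equal_objects dict1 dict2 → Spec_equal_objects dict1 dict2 (equal_objects dict1 dict2)

-- ===== LEMMAS AND PROOFS =====

-- filtering a key-nodup association list keeps its keys nodup
theorem pv_nodup_filter (l : List (String × String)) (p : String × String → Bool)
    (h : (l.map Prod.fst).Nodup) : ((l.filter p).map Prod.fst).Nodup :=
  List.Sublist.nodup (List.Sublist.map Prod.fst List.filter_sublist) h

-- rebuilding a dict from a key-nodup pair list keeps the list as its items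
theorem pv_items_ofList (l : List (String × String)) (h : (l.map Prod.fst).Nodup) :
    (PySem.Dict.ofList l).items = l := by
  have hfresh : ∀ a ∈ l, (PySem.Dict.empty : PySem.Dict String String).contains a.1 = false :=
    fun a _ => PySem.Dict.contains_empty a.1
  have := PySem.Dict.items_foldl_insert_fresh l Prod.fst Prod.snd PySem.Dict.empty hfresh h
  simpa using this

theorem pv_ofList_eq_mk (l : List (String × String)) (h : (l.map Prod.fst).Nodup) :
    PySem.Dict.ofList l = PySem.Dict.mk l :=
  PySem.Dict.ext (pv_items_ofList l h)

-- lookup in a key-nodup dict finds exactly the stored pair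
theorem pv_get?_of_mem (l : List (String × String)) (h : (l.map Prod.fst).Nodup)
    (kv : String × String) (hm : kv ∈ l) : (PySem.Dict.mk l).get? kv.1 = some kv.2 := by
  induction l with
  | nil => cases hm
  | cons a t ih =>
    obtain ⟨ak, av⟩ := a
    simp only [List.map_cons] at h
    have hnd := List.nodup_cons.mp h
    rw [PySem.Dict.get?_mk_cons]
    rcases List.mem_cons.mp hm with he | hmem
    · rw [he]; simp
    · have hne : (ak == kv.1) = false := by
        refine beq_eq_false_iff_ne.mpr (fun heq => hnd.1 ?_)
        exact heq ▸ List.mem_map_of_mem hmem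
      rw [hne, if_neg (by simp)]
      exact ih hnd.2 hmem

theorem pv_mem_of_get? (l : List (String × String)) (k : String) (v : String)
    (h : (PySem.Dict.mk l).get? k = some v) : (k, v) ∈ l := by
  simp only [PySem.Dict.get?, Option.map_eq_some_iff] at h
  obtain ⟨p, hp, hv⟩ := h
  have hmem := List.mem_of_find?_eq_some hp
  have hk : p.1 = k := by simpa using List.find?_some hp
  have : (k, v) = p := by cases p; simp_all
  simpa [this] using hmem

-- A's loop succeeds iff every retained pair of dict1 is stored verbatim in dict2
theorem pv_loopA_iff (l2 : List (String × String)) (l : List (String × String)) :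
    pvLoopA (PySem.Dict.mk l2) l = true ↔
      ∀ kv ∈ l, (PySem.Dict.mk l2).get? kv.1 = some kv.2 := by
  induction l with
  | nil => simp [pvLoopA]
  | cons a t ih =>
    obtain ⟨key, v1⟩ := a
    by_cases hc : (PySem.Dict.mk l2).contains key = false
    · have hnone : (PySem.Dict.mk l2).get? key = none := by
        simp only [PySem.Dict.contains, List.any_eq_false] at hc
        have hfind : l2.find? (fun p => p.1 == key) = none :=
          List.find?_eq_none.mpr (fun x hx => hc x hx)
        simp [PySem.Dict.get?, hfind]
      have hfalse : pvLoopA (PySem.Dict.mk l2) ((key, v1) :: t) = false := by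
        simp [pvLoopA, hc]
      rw [hfalse]
      simp only [Bool.false_eq_true, false_iff]
      intro h
      have := h (key, v1) (by simp)
      simp [hnone] at this
    · obtain ⟨w, hw⟩ : ∃ w, (PySem.Dict.mk l2).get? key = some w := by
        have hc' : (PySem.Dict.mk l2).contains key = true := by
          cases hcc : (PySem.Dict.mk l2).contains key <;> simp_all
        simp only [PySem.Dict.contains, List.any_eq_true] at hc'
        obtain ⟨p, hp, hpk⟩ := hc'
        obtain ⟨q, hq⟩ := Option.isSome_iff_exists.mp
          ((List.find?_isSome (p := fun r => r.1 == key)).mpr ⟨p, hp, hpk⟩)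
        exact ⟨q.2, by simp [PySem.Dict.get?, hq]⟩
      have hloop : pvLoopA (PySem.Dict.mk l2) ((key, v1) :: t)
          = if v1 == w then pvLoopA (PySem.Dict.mk l2) t else false := by
        simp [pvLoopA, hc, PySem.Dict.getD, hw]
      by_cases hv : v1 = w
      · subst hv
        rw [hloop, if_pos (by simp), ih]
        constructor
        · intro h kv hkv
          rcases List.mem_cons.mp hkv with he | hkv
          · rw [he]; exact hw
          · exact h kv hkv
        · intro h kv hkv; exact h kv (List.mem_cons_of_mem _ hkv)
      · rw [hloop, if_neg (by simp [hv])]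
        simp only [Bool.false_eq_true, false_iff]
        intro h
        have := h (key, v1) (by simp)
        rw [hw] at this
        exact hv (by simpa using this.symm)

-- the heart of the equivalence: A's length check + per-key lookup over two key-nodup pair
-- lists agrees with B's sort-by-key-and-compare
theorem pv_core (l1 l2 : List (String × String))
    (h1 : (l1.map Prod.fst).Nodup) (h2 : (l2.map Prod.fst).Nodup) :
    (if l1.length ≠ l2.length then false else pvLoopA (PySem.Dict.mk l2) l1)
      = (PySem.List.sorted l1 (fun kv => kv.1) == PySem.List.sorted l2 (fun kv => kv.1)) := by
  rw [Bool.eq_iff_iff]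
  simp only [beq_iff_eq]
  constructor
  · intro h
    have hlen : l1.length = l2.length := by
      by_contra hne
      rw [if_pos hne] at h
      simp at h
    rw [if_neg (by simp [hlen])] at h
    have hall := (pv_loopA_iff l2 l1).mp h
    have hsub : l1 ⊆ l2 := fun kv hkv => pv_mem_of_get? l2 kv.1 kv.2 (hall kv hkv)
    have hperm : l1.Perm l2 :=
      (List.subperm_of_subset (h1.of_map Prod.fst) hsub).perm_of_length_le (le_of_eq hlen.symm)
    symm
    apply PySem.List.sorted_eq_of_perm_of_pairwise_lt l2
      (PySem.List.sorted l1 (fun kv => kv.1)) (fun kv => kv.1)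
      ((PySem.List.sorted_perm l1 (fun kv => kv.1) false).trans hperm)
    have hnd : ((PySem.List.sorted l1 (fun kv => kv.1)).map Prod.fst).Nodup :=
      (((PySem.List.sorted_perm l1 (fun kv => kv.1) false).map Prod.fst).nodup_iff).mpr h1
    have hne := List.pairwise_map.mp (List.nodup_iff_pairwise_ne.mp hnd)
    have hle := PySem.List.sorted_pairwise l1 (fun kv => kv.1)
    exact (hle.and hne).imp (fun hab => lt_of_le_of_ne hab.1 hab.2)
  · intro h
    have hperm : l1.Perm l2 :=
      (PySem.List.sorted_perm l1 (fun kv => kv.1) false).symm.trans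
        (h ▸ PySem.List.sorted_perm l2 (fun kv => kv.1) false)
    have hlen := hperm.length_eq
    rw [if_neg (by omega)]
    exact (pv_loopA_iff l2 l1).mpr
      (fun kv hkv => pv_get?_of_mem l2 h2 kv (hperm.subset hkv))

-- ===== VERDICT (by name: the statement is the Claim_ definition above) =====
theorem equal_objects_spec : Claim_equal_equal_objects := by
  intro dict1 dict2 _
  unfold Spec_equal_objects equal_objects equal_objects_alt pvCompA pvSignificant
  have k1 : ((PySem.Dict.ofList dict1).items.map Prod.fst).Nodup := by
    simpa [PySem.Dict.keys] using PySem.Dict.nodup_keys_ofList dict1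
  have k2 : ((PySem.Dict.ofList dict2).items.map Prod.fst).Nodup := by
    simpa [PySem.Dict.keys] using PySem.Dict.nodup_keys_ofList dict2
  set l1 := (PySem.Dict.ofList dict1).items.filter
    (fun kv => !(pvIgnoredFields.contains kv.1) && kv.2 != "") with hl1
  set l2 := (PySem.Dict.ofList dict2).items.filter
    (fun kv => !(pvIgnoredFields.contains kv.1) && kv.2 != "") with hl2
  have n1 : (l1.map Prod.fst).Nodup := pv_nodup_filter _ _ k1
  have n2 : (l2.map Prod.fst).Nodup := pv_nodup_filter _ _ k2
  rw [pv_ofList_eq_mk l1 n1, pv_ofList_eq_mk l2 n2, ← pv_core l1 l2 n1 n2]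
  rfl
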